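-- pv_equiv track=rewrite | github.com/ilineserg/sddata | exercise.py | calculate
-- ===== SOURCE A (Python) =====
-- def get_index_of_max(num_list):
--     x = 0
--     index = 0
--     for idx, num in enumerate(num_list):
--         if num > x:
--             x = num
--             index = idx
--     return index
--
-- def calculate(num_list):
--     if len(num_list) == 1:
--         return num_list[0]
--     else:
--         max_index = get_index_of_max(num_list)
--         total = num_list[max_index]
--         # голова - слева
--         head = num_list[:max_index]
--         # хвост - справа
--         tail = num_list[max_index + 1:]
--     if head:
--         total *= sum(head)
--     if tail:
--         return total + calculate(tail)
--     else:
--         return total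
-- ===== SOURCE B (Python) =====
-- def calculate(num_list):
--     # Single O(n) right-to-left pass; state: M = max(0, max of suffix),
--     # vj = value at the thresholded argmax, S = sum of elements before it,
--     # T = answer for the part after it, F = answer for the whole suffix.
--     M = 0
--     vj = 0
--     S = 0
--     T = 0
--     F = 0
--     for v in reversed(num_list):
--         if M == 0 or (v > 0 and v >= M):
--             vj, S, T, F = v, 0, F, v + F
--         else:
--             S += v
--             F = vj * S + T
--         if v > M:
--             M = v
--     return F
-- ===== Notes on version B (the rewrite author's own statement) =====
-- stated objective: faster
-- what changed: A recursively rescans each suffix for its thresholded argmax (O(n^2)); B computes the answer in one right-to-left pass maintaining the suffix max, the argmax value, the running left-sum and the answers of the two relevant suffixes.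
-- outside the precondition, e.g. on calculate([]): A raises IndexError, B returns 0
import Mathlib
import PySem

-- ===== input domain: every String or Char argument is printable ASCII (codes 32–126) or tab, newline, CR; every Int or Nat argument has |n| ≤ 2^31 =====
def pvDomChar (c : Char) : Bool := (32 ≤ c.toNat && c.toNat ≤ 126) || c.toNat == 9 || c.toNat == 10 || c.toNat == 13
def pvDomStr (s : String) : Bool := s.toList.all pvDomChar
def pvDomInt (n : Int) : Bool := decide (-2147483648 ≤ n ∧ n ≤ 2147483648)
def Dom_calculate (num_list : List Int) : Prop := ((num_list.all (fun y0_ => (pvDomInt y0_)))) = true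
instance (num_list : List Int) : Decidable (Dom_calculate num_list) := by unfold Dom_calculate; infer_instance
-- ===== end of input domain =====

-- B replaces A's recursive argmax-rescan (O(n^2)) by a single right-to-left pass (O(n)).

-- ===== PORT A =====
def get_index_of_max (num_list : List Int) : Int :=
  ((PySem.List.enumerate num_list 0).foldl
    (fun (st : Int × Int) p => if p.2 > st.1 then (p.2, p.1) else st) (0, 0)).2

-- termination helper for `calculate` (cited in its decreasing_by)
theorem gim_fold_snd_nonneg (l : List Int) : ∀ (s x i : Int), 0 ≤ s → 0 ≤ i →
    0 ≤ ((PySem.List.enumerate l s).foldl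
      (fun (st : Int × Int) p => if p.2 > st.1 then (p.2, p.1) else st) (x, i)).2 := by
  induction l with
  | nil => intro s x i _ hi; simpa [PySem.List.enumerate_nil] using hi
  | cons v r ih =>
    intro s x i hs hi
    rw [PySem.List.enumerate_cons]
    simp only [List.foldl_cons]
    by_cases h : v > x
    · simp only [h, if_pos]
      exact ih (s+1) v s (by omega) hs
    · simp only [h, if_neg, not_false_iff]
      exact ih (s+1) x i (by omega) hi

theorem gim_nonneg (l : List Int) : 0 ≤ get_index_of_max l :=
  gim_fold_snd_nonneg l 0 0 0 le_rfl le_rfl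

def calculate (num_list : List Int) : Int :=
  if num_list.length = 1 then (PySem.List.pyGet? num_list 0).getD 0
  else
    let max_index := get_index_of_max num_list
    let total := (PySem.List.pyGet? num_list max_index).getD 0
    let head := PySem.List.slice num_list none (some max_index)
    let tail := PySem.List.slice num_list (some (max_index + 1)) none
    let total := if head ≠ [] then total * head.sum else total
    if h : tail ≠ [] then total + calculate tail else total
termination_by num_list.length
decreasing_by
  have h0 := gim_nonneg num_list
  have h' : PySem.List.slice num_list (some (get_index_of_max num_list + 1)) ≠ [] := h
  rw [PySem.List.slice_from _ (by omega)] at h' ⊢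
  rw [ne_eq, List.drop_eq_nil_iff] at h'
  simp only [List.length_drop]
  omega

-- ===== PORT B =====
def calculate_alt (num_list : List Int) : Int :=
  (num_list.foldr
    (fun v st =>
      let M := st.1
      let vj := st.2.1
      let S := st.2.2.1
      let T := st.2.2.2.1
      let F := st.2.2.2.2
      let st' : Int × Int × Int × Int :=
        if M = 0 ∨ (0 < v ∧ M ≤ v) then (v, 0, F, v + F)
        else (vj, v + S, T, vj * (v + S) + T)
      ((if M < v then v else M), st'))
    ((0 : Int), (0 : Int), (0 : Int), (0 : Int), (0 : Int))).2.2.2.2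

-- ===== PRECONDITION & SPEC =====
-- A raises IndexError on [] (num_list[0] after the scan); Pre_ excludes exactly that input.
def Pre_calculate (num_list : List Int) : Prop := num_list ≠ []
instance (num_list : List Int) : Decidable (Pre_calculate num_list) := by unfold Pre_calculate; infer_instance
def pvWitness_calculate : List Int := [3, -1, 2]

def Spec_calculate (num_list : List Int) (out : Int) : Prop := out = calculate_alt num_list
instance (num_list : List Int) (out : Int) : Decidable (Spec_calculate num_list out) := by unfold Spec_calculate; infer_instance

-- ===== CLAIM (what is proved, stated in full; the proofs are below) =====
def Claim_equal_calculate : Prop := ∀ (num_list : List Int), Dom_calculate num_list → Pre_calculate num_list → Spec_calculate num_list (calculate num_list)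

-- ===== LEMMAS AND PROOFS =====

-- reference quantities: mx l = max(0, max l); jdx l = A's thresholded first-argmax index
def mx : List Int → Int
  | [] => 0
  | v :: r => if mx r < v then v else mx r

def jdx : List Int → Nat
  | [] => 0
  | v :: r => if 0 < v ∧ mx r ≤ v then 0 else if 0 < mx r then jdx r + 1 else 0

theorem mx_nonneg (l : List Int) : 0 ≤ mx l := by
  induction l with
  | nil => simp [mx]
  | cons v r ih => simp only [mx]; split <;> omega

-- reference recursion: g = the value both programs compute
def g : List Int → Int
  | [] => 0
  | v :: r =>
    let l := v :: r
    let j := jdx l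
    (if 0 < j then l.getD j 0 * (l.take j).sum else l.getD j 0) + g (l.drop (j + 1))
termination_by l => l.length
decreasing_by simp only [List.length_drop, List.length_cons]; omega

theorem jdx_lt (l : List Int) (h : l ≠ []) : jdx l < l.length := by
  induction l with
  | nil => simp at h
  | cons v r ih =>
    simp only [jdx]
    split
    · simp
    · split
      · rename_i hmx
        have hr : r ≠ [] := by rintro rfl; simp [mx] at hmx
        have := ih hr
        simp only [List.length_cons]; omega
      · simp

theorem jdx_of_mx_nonpos (l : List Int) (h : mx l ≤ 0) : jdx l = 0 := by
  cases l with
  | nil => rfl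
  | cons v r =>
    have hmr := mx_nonneg r
    have hr : mx r ≤ 0 := by
      simp only [mx] at h; split at h <;> omega
    have hv : v ≤ 0 := by
      simp only [mx] at h; split at h <;> omega
    simp only [jdx]
    rw [if_neg (by omega), if_neg (by omega)]

-- characterisation of A's argmax fold
theorem gim_fold_char (l : List Int) : ∀ (s x i : Int), 0 ≤ x →
    ((PySem.List.enumerate l s).foldl
      (fun (st : Int × Int) p => if p.2 > st.1 then (p.2, p.1) else st) (x, i))
    = if x < mx l then (mx l, s + (jdx l : Int)) else (x, i) := by
  induction l with
  | nil =>
    intro s x i hx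
    rw [PySem.List.enumerate_nil]
    simp only [List.foldl_nil, mx]
    rw [if_neg (by omega)]
  | cons v r ih =>
    intro s x i hx
    rw [PySem.List.enumerate_cons]
    simp only [List.foldl_cons]
    by_cases hvx : v > x
    · rw [if_pos hvx, ih (s+1) v s (by omega)]
      by_cases hmr : v < mx r
      · rw [if_pos hmr]
        have hmx : mx (v :: r) = mx r := by simp only [mx]; rw [if_neg (by omega)]
        have hj : jdx (v :: r) = jdx r + 1 := by
          simp only [jdx]; rw [if_neg (by omega), if_pos (by omega)]
        rw [hmx, hj, if_pos (by omega)]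
        congr 1; push_cast; ring
      · rw [if_neg hmr]
        have hmx : mx (v :: r) = v := by simp only [mx]; split <;> omega
        have hj : jdx (v :: r) = 0 := by
          simp only [jdx]; rw [if_pos (by constructor <;> omega)]
        rw [hmx, hj, if_pos (by omega)]
        simp
    · rw [if_neg hvx, ih (s+1) x i hx]
      by_cases hmr : x < mx r
      · rw [if_pos hmr]
        have hmx : mx (v :: r) = mx r := by simp only [mx]; rw [if_neg (by omega)]
        have hj : jdx (v :: r) = jdx r + 1 := by
          simp only [jdx]; rw [if_neg (by omega), if_pos (by omega)]
        rw [hmx, hj, if_pos (by omega)]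
        congr 1; push_cast; ring
      · rw [if_neg hmr]
        have hmx : mx (v :: r) ≤ x := by simp only [mx]; split <;> omega
        rw [if_neg (by omega)]

theorem gim_eq_jdx (l : List Int) : get_index_of_max l = (jdx l : Int) := by
  unfold get_index_of_max
  rw [gim_fold_char l 0 0 0 le_rfl]
  by_cases h : (0 : Int) < mx l
  · rw [if_pos h]; simp
  · rw [if_neg h, jdx_of_mx_nonpos l (by omega)]; simp

-- unfolding of g at a nonempty list
theorem g_cons (l : List Int) (h : l ≠ []) :
    g l = (if 0 < jdx l then l.getD (jdx l) 0 * (l.take (jdx l)).sum else l.getD (jdx l) 0)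
          + g (l.drop (jdx l + 1)) := by
  cases l with
  | nil => simp at h
  | cons v r => rw [g.eq_def]


-- A computes g
theorem calc_eq_g : ∀ (n : Nat) (l : List Int), l.length ≤ n → l ≠ [] → calculate l = g l := by
  intro n
  induction n with
  | zero => intro l hl hne; cases l <;> simp_all
  | succ m ih =>
    intro l hl hne
    rw [calculate.eq_def]
    have hjlt := jdx_lt l hne
    have hget : (PySem.List.pyGet? l ((jdx l : Nat) : Int)).getD 0 = l.getD (jdx l) 0 := by
      simp [PySem.List.pyGet?_natCast, List.getD_eq_getElem?_getD]
    by_cases h1 : l.length = 1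
    · rw [if_pos h1]
      obtain ⟨a, rfl⟩ : ∃ a, l = [a] := by
        cases l with
        | nil => simp at h1
        | cons v r => cases r <;> simp_all
      have hj : jdx [a] = 0 := by
        simp only [jdx, mx]; split <;> [rfl; rw [if_neg (by omega)]]
      rw [g_cons [a] (by simp), hj]
      simp [PySem.List.pyGet?, PySem.List.pyIdx?, g.eq_def]
    · rw [if_neg h1]
      simp only [gim_eq_jdx]
      rw [hget]
      have hhead : PySem.List.slice l none (some ((jdx l : Nat) : Int)) = l.take (jdx l) :=
        PySem.List.slice_to_natCast l (jdx l)
      have htail : PySem.List.slice l (some (((jdx l : Nat) : Int) + 1)) none = l.drop (jdx l + 1) := by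
        have : ((jdx l : Nat) : Int) + 1 = ((jdx l + 1 : Nat) : Int) := by push_cast; ring
        rw [this, PySem.List.slice_from_natCast]
      rw [hhead, htail]
      have hheadne : (l.take (jdx l) ≠ []) ↔ 0 < jdx l := by
        rw [ne_eq, List.take_eq_nil_iff]
        constructor
        · intro h; omega
        · rintro h (h' | h') <;> simp_all
      by_cases hj0 : 0 < jdx l
      · rw [if_pos (hheadne.mpr hj0)]
        rw [g_cons l hne, if_pos hj0]
        by_cases ht : l.drop (jdx l + 1) ≠ []
        · rw [dif_pos ht]
          have hlen : (l.drop (jdx l + 1)).length ≤ m := by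
            simp only [List.length_drop]; omega
          rw [ih _ hlen ht]
        · rw [dif_neg ht]
          push_neg at ht
          rw [ht]
          rw [g.eq_def]
          simp
      · rw [if_neg (fun hc => hj0 (hheadne.mp hc))]
        rw [g_cons l hne, if_neg hj0]
        by_cases ht : l.drop (jdx l + 1) ≠ []
        · rw [dif_pos ht]
          have hlen : (l.drop (jdx l + 1)).length ≤ m := by
            simp only [List.length_drop]; omega
          rw [ih _ hlen ht]
        · rw [dif_neg ht]
          push_neg at ht
          rw [ht]
          rw [g.eq_def]
          simp

-- B's fold maintains (mx, argmax value, left-sum, answer after argmax, answer)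
theorem alt_fold_inv (l : List Int) :
    (l.foldr
      (fun v st =>
        let M := st.1
        let vj := st.2.1
        let S := st.2.2.1
        let T := st.2.2.2.1
        let F := st.2.2.2.2
        let st' : Int × Int × Int × Int :=
          if M = 0 ∨ (0 < v ∧ M ≤ v) then (v, 0, F, v + F)
          else (vj, v + S, T, vj * (v + S) + T)
        ((if M < v then v else M), st'))
      ((0 : Int), (0 : Int), (0 : Int), (0 : Int), (0 : Int)))
    = (mx l, l.getD (jdx l) 0, (l.take (jdx l)).sum, g (l.drop (jdx l + 1)), g l) := by
  induction l with
  | nil => simp [mx, jdx, g.eq_def]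
  | cons v r ih =>
    rw [List.foldr_cons, ih]
    simp only
    by_cases hrec : mx r = 0 ∨ (0 < v ∧ mx r ≤ v)
    · rw [if_pos hrec]
      have hj : jdx (v :: r) = 0 := by
        simp only [jdx]
        by_cases hv : 0 < v ∧ mx r ≤ v
        · rw [if_pos hv]
        · rw [if_neg hv, if_neg (by rcases hrec with h | h <;> [omega; exact absurd h hv])]
      have hg : g (v :: r) = v + g r := by
        rw [g_cons (v :: r) (by simp), hj]
        simp
      have hmx : mx (v :: r) = if mx r < v then v else mx r := rfl
      rw [hmx, hj, hg]
      simp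
    · rw [if_neg hrec]
      push_neg at hrec
      obtain ⟨hm0, hvlt⟩ := hrec
      have hmpos : 0 < mx r := by have := mx_nonneg r; omega
      have hnotrec : ¬ (0 < v ∧ mx r ≤ v) := fun ⟨h1, h2⟩ => by have := hvlt h1; omega
      have hj : jdx (v :: r) = jdx r + 1 := by
        simp only [jdx]; rw [if_neg hnotrec, if_pos hmpos]
      have hmx : mx (v :: r) = if mx r < v then v else mx r := rfl
      have hg : g (v :: r) = r.getD (jdx r) 0 * (v + (r.take (jdx r)).sum) + g (r.drop (jdx r + 1)) := by
        rw [g_cons (v :: r) (by simp), hj]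
        rw [if_pos (by omega)]
        simp [List.sum_cons]
      rw [hmx, hj, hg]
      simp [List.sum_cons]

theorem alt_eq_g (l : List Int) : calculate_alt l = g l := by
  unfold calculate_alt
  rw [alt_fold_inv l]

-- ===== VERDICT (by name: the statement is the Claim_ definition above) =====
theorem calculate_spec : Claim_equal_calculate := by
  intro l _ hpre
  unfold Spec_calculate
  rw [alt_eq_g, calc_eq_g l.length l le_rfl hpre]
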